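-- pv_equiv track=rewrite | github.com/fy666/adventOfCode2018 | 2017/day9.py | clear_seq
-- ===== SOURCE A (Python) =====
-- def clear_seq(seq):
--     pass_next=0
--     cleared=0
--     new_seq=[]
--     garbage=0
--     for f in seq:
--         if(pass_next):
--             pass_next=0
--         else:
--             if(f=='<' and cleared==0):
--                 cleared=1
--             elif(f == '>' and cleared==1):
--                 cleared=0
--             elif(f == '!'):
--                 pass_next=1
--             elif(cleared==0):
--                 new_seq.append(f)
--             else:
--                 garbage +=1
--     return(new_seq, garbage)
-- ===== SOURCE B (Python) =====
-- def clear_seq(seq):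
--     # Phase 1: strip every '!' together with the element right after it.
--     items = list(seq)
--     cleaned = []
--     i = 0
--     n = len(items)
--     while i < n:
--         if items[i] == '!':
--             i += 2
--         else:
--             cleaned.append(items[i])
--             i += 1
--     # Phase 2: single in_garbage boolean over the cleaned elements.
--     new_seq = []
--     garbage = 0
--     in_garbage = False
--     for f in cleaned:
--         if not in_garbage:
--             if f == '<':
--                 in_garbage = True
--             else:
--                 new_seq.append(f)
--         else:
--             if f == '>':
--                 in_garbage = False
--             else:
--                 garbage += 1
--     return (new_seq, garbage)
-- ===== Notes on version B (the rewrite author's own statement) =====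
-- stated objective: alternative
-- what changed: Splits A's single four-state loop into two passes: one pass that deletes each '!' with its following element, then a pass with a single in_garbage boolean that collects non-garbage chars and counts garbage.
import Mathlib
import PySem

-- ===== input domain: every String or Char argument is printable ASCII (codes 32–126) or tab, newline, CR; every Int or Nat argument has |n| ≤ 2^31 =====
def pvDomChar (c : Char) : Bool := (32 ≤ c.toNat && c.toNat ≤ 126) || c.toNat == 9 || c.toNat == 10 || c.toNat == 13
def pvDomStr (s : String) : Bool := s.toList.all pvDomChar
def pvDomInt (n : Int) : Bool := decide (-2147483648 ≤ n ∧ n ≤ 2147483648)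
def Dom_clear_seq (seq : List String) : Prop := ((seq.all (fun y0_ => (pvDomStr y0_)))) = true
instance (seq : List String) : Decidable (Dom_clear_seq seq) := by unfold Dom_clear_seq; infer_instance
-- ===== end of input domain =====

-- B replaces A's single loop with four int-state variables by two passes: strip '!'+next, then a one-boolean garbage scan; alternative decomposition, same cost.


-- ===== PORT A =====
-- one step of A's for-loop; state = (pass_next, cleared, new_seq, garbage)
def pvStepA (st : Int × Int × List String × Int) (f : String) : Int × Int × List String × Int :=
  let (pass_next, cleared, new_seq, garbage) := st
  if pass_next ≠ 0 then (0, cleared, new_seq, garbage)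
  else if f = "<" ∧ cleared = 0 then (pass_next, 1, new_seq, garbage)
  else if f = ">" ∧ cleared = 1 then (pass_next, 0, new_seq, garbage)
  else if f = "!" then (1, cleared, new_seq, garbage)
  else if cleared = 0 then (pass_next, cleared, new_seq ++ [f], garbage)
  else (pass_next, cleared, new_seq, garbage + 1)

def clear_seq (seq : List String) : List String × Int :=
  let st := seq.foldl pvStepA (0, 0, [], 0)
  (st.2.2.1, st.2.2.2)

-- ===== PORT B =====
-- phase 1: drop every "!" together with the element right after it
def pvDropBang : List String → List String
  | [] => []
  | x :: rest =>
    if x = "!" then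
      match rest with
      | [] => []
      | _ :: r => pvDropBang r
    else x :: pvDropBang rest

-- phase 2 step; state = (in_garbage, new_seq, garbage)
def pvStepB (st : Bool × List String × Int) (f : String) : Bool × List String × Int :=
  let (in_garbage, new_seq, garbage) := st
  if !in_garbage then
    if f = "<" then (true, new_seq, garbage) else (false, new_seq ++ [f], garbage)
  else
    if f = ">" then (false, new_seq, garbage) else (true, new_seq, garbage + 1)

def clear_seq_alt (seq : List String) : List String × Int :=
  let cleaned := pvDropBang seq
  let st := cleaned.foldl pvStepB (false, [], 0)
  (st.2.1, st.2.2)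

-- ===== PRECONDITION & SPEC =====
def Spec_clear_seq (seq : List String) (out : List String × Int) : Prop := out = clear_seq_alt seq
instance (seq : List String) (out : List String × Int) : Decidable (Spec_clear_seq seq out) := by unfold Spec_clear_seq; infer_instance

-- ===== CLAIM (what is proved, stated in full; the proofs are below) =====
def Claim_equal_clear_seq : Prop := ∀ (seq : List String), Dom_clear_seq seq → Spec_clear_seq seq (clear_seq seq)

-- ===== LEMMAS AND PROOFS =====
lemma pv_dropBang_cons_ne (x : String) (rest : List String) (hx : ¬ x = "!") :
    pvDropBang (x :: rest) = x :: pvDropBang rest := by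
  rw [pvDropBang.eq_def]; simp [hx]

lemma pv_loop_eq (seq : List String) : ∀ (c : Bool) (ns : List String) (g : Int),
    (seq.foldl pvStepA (0, (if c then (1:Int) else 0), ns, g)).2.2 =
    ((pvDropBang seq).foldl pvStepB (c, ns, g)).2 := by
  induction seq using pvDropBang.induct with
  | case1 => intro c ns g; simp [pvDropBang]
  | case2 =>
    intro c ns g
    cases c <;> simp [pvDropBang, pvStepA]
  | case3 y r ih =>
    intro c ns g
    cases c with
    | false => simp [pvDropBang, pvStepA]; simpa using ih false ns g
    | true => simp [pvDropBang, pvStepA]; simpa using ih true ns g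
  | case4 x rest hx ih =>
    intro c ns g
    rw [pv_dropBang_cons_ne x rest hx]
    cases c with
    | false =>
      by_cases h1 : x = "<"
      · simp [h1, pvStepA, pvStepB]; simpa using ih true ns g
      · simp [hx, h1, pvStepA, pvStepB]; simpa using ih false (ns ++ [x]) g
    | true =>
      by_cases h1 : x = ">"
      · simp [h1, pvStepA, pvStepB]; simpa using ih false ns g
      · simp [hx, h1, pvStepA, pvStepB]; simpa using ih true ns (g + 1)

-- ===== VERDICT (by name: the statement is the Claim_ definition above) =====
theorem clear_seq_spec : Claim_equal_clear_seq := by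
  intro seq _
  unfold Spec_clear_seq clear_seq clear_seq_alt
  have h := pv_loop_eq seq false [] 0
  simp at h
  simp [h]
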